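-- pv_equiv track=rewrite | github.com/reverb256/ai-inference-gateway | src/vision.py | recommend_vision_model
-- ===== SOURCE A (Python) =====
-- from typing import Dict, List, Optional, Any, Union
--
-- VISION_CAPABLE_MODELS = {
--     "qwen3.5-35b-a3b",
--     "qwen3.5-27b",
--     "qwen3.5-9b",
--     "qwen3.5-4b",
--     "crow-9b-opus-4.6-distill-heretic_qwen3.5",
-- }
--
-- def is_vision_capable_model(model_id: str) -> bool:
--     """
--     Check if a model supports vision.
--
--     Args:
--         model_id: Model identifier
--
--     Returns:
--         True if model has vision capabilities (mmproj file)
--     """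
--     model_lower = model_id.lower()
--
--     for vision_model in VISION_CAPABLE_MODELS:
--         if vision_model in model_lower:
--             return True
--
--     return False
--
-- def recommend_vision_model(
--     available_models: List[str], quality_priority: bool = False
-- ) -> Optional[str]:
--     """
--     Recommend the best vision model from available options.
--
--     Args:
--         available_models: List of available model IDs
--         quality_priority: If True, prefer larger models (35B-A3B)
--                         If False, prefer faster models (4B)
--
--     Returns:
--         Recommended model ID or None
--     """
--     # Filter to vision-capable models
--     vision_models = [m for m in available_models if is_vision_capable_model(m)]
--
--     if not vision_models:
--         return None
--
--     if quality_priority: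
--         # Prefer larger models
--         priority_order = [
--             "35b-a3b",  # Best quality, 256K context
--             "27b",  # High quality
--             "9b",  # Balanced
--             "4b",  # Faster
--         ]
--
--         for priority in priority_order:
--             for model in vision_models:
--                 if priority in model.lower():
--                     return model
--     else:
--         # Prefer faster models
--         priority_order = [
--             "4b",  # Fastest
--             "9b",  # Balanced
--             "27b",  # High quality
--             "35b-a3b",  # Best quality
--         ]
--
--         for priority in priority_order:
--             for model in vision_models:
--                 if priority in model.lower():
--                     return model
--
--     # Fallback to first available
--     return vision_models[0]
-- ===== SOURCE B (Python) =====
-- from typing import List, Optional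
--
-- VISION_CAPABLE_MODELS = {
--     "qwen3.5-35b-a3b",
--     "qwen3.5-27b",
--     "qwen3.5-9b",
--     "qwen3.5-4b",
--     "crow-9b-opus-4.6-distill-heretic_qwen3.5",
-- }
--
--
-- def _is_vision_capable(model_id: str) -> bool:
--     model_lower = model_id.lower()
--     return any(v in model_lower for v in VISION_CAPABLE_MODELS)
--
--
-- def recommend_vision_model(available_models: List[str], quality_priority: bool = False) -> Optional[str]:
--     vision_models = [m for m in available_models if _is_vision_capable(m)]
--     if not vision_models:
--         return None
--     order = ["35b-a3b", "27b", "9b", "4b"] if quality_priority else ["4b", "9b", "27b", "35b-a3b"]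
--
--     def rank(model: str) -> int:
--         ml = model.lower()
--         return min((i for i, p in enumerate(order) if p in ml), default=len(order))
--
--     # min is stable: the first model with the minimal rank wins, which reproduces
--     # the priority scan and the vision_models[0] fallback (all ranks == len(order)).
--     return min(vision_models, key=rank)
-- ===== Notes on version B (the rewrite author's own statement) =====
-- stated objective: simpler
-- what changed: Replaces the two hand-written priority-order nested scans and the separate [0] fallback with a single stable min over the vision models keyed by the rank (first matching priority index, default len(order)).
import Mathlib
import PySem

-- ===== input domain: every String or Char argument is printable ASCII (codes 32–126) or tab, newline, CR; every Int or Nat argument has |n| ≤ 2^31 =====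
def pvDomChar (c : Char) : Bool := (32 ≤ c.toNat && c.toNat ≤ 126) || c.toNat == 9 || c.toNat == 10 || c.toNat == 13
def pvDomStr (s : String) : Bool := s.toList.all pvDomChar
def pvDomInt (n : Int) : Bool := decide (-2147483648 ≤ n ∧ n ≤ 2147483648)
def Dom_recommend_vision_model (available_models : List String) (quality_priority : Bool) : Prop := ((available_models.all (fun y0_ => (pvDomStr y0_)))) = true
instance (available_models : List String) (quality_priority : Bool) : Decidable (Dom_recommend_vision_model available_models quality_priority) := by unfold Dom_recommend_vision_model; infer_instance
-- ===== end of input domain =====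

-- B replaces A's two nested priority scans and the separate [0] fallback with one stable
-- min over the vision models keyed by rank (first matching priority index, default len);
-- objective: simpler (same asymptotic cost).

-- ===== PORT A =====
def visionCapableModels : List String :=
  ["qwen3.5-35b-a3b", "qwen3.5-27b", "qwen3.5-9b", "qwen3.5-4b",
   "crow-9b-opus-4.6-distill-heretic_qwen3.5"]

-- 'for vision_model in VISION_CAPABLE_MODELS: if vision_model in model_lower: return True'
def aVisLoop : List String → String → Bool
  | [], _ => false
  | v :: vs, ml => if PySem.Str.isIn v ml then true else aVisLoop vs ml

def is_vision_capable_model (model_id : String) : Bool :=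
  aVisLoop visionCapableModels (PySem.Str.lower model_id)

-- 'for priority in priority_order: for model in vision_models: if priority in model.lower(): return model'
def aFindPriority : List String → List String → Option String
  | [], _ => none
  | p :: ps, models =>
    match models.find? (fun m => PySem.Str.isIn p (PySem.Str.lower m)) with
    | some m => some m
    | none => aFindPriority ps models

def recommend_vision_model (available_models : List String) (quality_priority : Bool) : Option String :=
  let vision_models := available_models.filter is_vision_capable_model
  if vision_models.isEmpty then none
  else
    let priority_order :=
      if quality_priority then ["35b-a3b", "27b", "9b", "4b"]
      else ["4b", "9b", "27b", "35b-a3b"]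
    match aFindPriority priority_order vision_models with
    | some m => some m
    | none => PySem.List.pyGet? vision_models 0   -- vision_models[0]; list is nonempty here

-- ===== PORT B =====
-- B reads the same module-level constant VISION_CAPABLE_MODELS as A
def b_is_vision_capable (model_id : String) : Bool :=
  let ml := PySem.Str.lower model_id
  visionCapableModels.any (fun v => PySem.Str.isIn v ml)

-- rank(model) = min((i for i, p in enumerate(order) if p in ml), default=len(order))
def bRank (order : List String) (model : String) : Int :=
  match PySem.List.min?
      (((PySem.List.enumerate order).filter
          (fun q => PySem.Str.isIn q.2 (PySem.Str.lower model))).map (·.1))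
      (fun i => i) with
  | some i => i
  | none => (order.length : Int)

def recommend_vision_model_alt (available_models : List String) (quality_priority : Bool) : Option String :=
  let vision_models := available_models.filter b_is_vision_capable
  if vision_models.isEmpty then none
  else
    let order :=
      if quality_priority then ["35b-a3b", "27b", "9b", "4b"]
      else ["4b", "9b", "27b", "35b-a3b"]
    PySem.List.min? vision_models (bRank order)   -- min(vision_models, key=rank): stable, first min wins

-- ===== PRECONDITION & SPEC =====
def Spec_recommend_vision_model (available_models : List String) (quality_priority : Bool) (out : Option String) : Prop := out = recommend_vision_model_alt available_models quality_priority
instance (available_models : List String) (quality_priority : Bool) (out : Option String) : Decidable (Spec_recommend_vision_model available_models quality_priority out) := by unfold Spec_recommend_vision_model; infer_instance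

-- ===== CLAIM (what is proved, stated in full; the proofs are below) =====
def Claim_equal_recommend_vision_model : Prop := ∀ (available_models : List String) (quality_priority : Bool), Dom_recommend_vision_model available_models quality_priority → Spec_recommend_vision_model available_models quality_priority (recommend_vision_model available_models quality_priority)

-- ===== LEMMAS AND PROOFS =====

-- the Nat-valued rank: index of the first priority that is a substring of model.lower()
def kIdx (order : List String) (m : String) : Nat :=
  List.findIdx (fun p => PySem.Str.isIn p (PySem.Str.lower m)) order

-- the accumulator step of PySem.List.min?
def stepMin {α κ : Type} [LinearOrder κ] (key : α → κ) (m x : α) : α :=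
  if key x < key m then x else m

theorem aVisLoop_eq_any (l : List String) (ml : String) :
    aVisLoop l ml = l.any (fun v => PySem.Str.isIn v ml) := by
  induction l with
  | nil => rfl
  | cons v vs ih => cases h : PySem.Str.isIn v ml <;> simp [aVisLoop, h, ih]

theorem vis_eq : is_vision_capable_model = b_is_vision_capable := by
  funext m
  simp [is_vision_capable_model, b_is_vision_capable, aVisLoop_eq_any,
    visionCapableModels]

theorem aFindPriority_cons (p : String) (ps models : List String) :
    aFindPriority (p :: ps) models
      = match models.find? (fun m => PySem.Str.isIn p (PySem.Str.lower m)) with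
        | some m => some m
        | none => aFindPriority ps models := rfl

theorem foldl_some {α κ : Type} [LinearOrder κ] (key : α → κ) :
    ∀ (t : List α) (v : α),
      List.foldl
        (fun acc x => match acc with
          | none => some x
          | some m => if key x < key m then some x else some m)
        (some v) t = some (t.foldl (stepMin key) v) := by
  intro t
  induction t with
  | nil => intro v; rfl
  | cons x xs ih =>
    intro v
    simp only [List.foldl]
    rw [show (if key x < key v then some x else some v) = some (stepMin key v x) by
      unfold stepMin; split_ifs <;> rfl]
    exact ih _

theorem min?_cons {α κ : Type} [LinearOrder κ] (key : α → κ) (v : α) (t : List α) :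
    PySem.List.min? (v :: t) key = some (t.foldl (stepMin key) v) := by
  unfold PySem.List.min?
  simp only [List.foldl]
  exact foldl_some key t v

theorem foldl_stay {α κ : Type} [LinearOrder κ] (key : α → κ) :
    ∀ (t : List α) (v : α), (∀ x ∈ t, ¬ key x < key v) → t.foldl (stepMin key) v = v := by
  intro t
  induction t with
  | nil => intro v _; rfl
  | cons x xs ih =>
    intro v h
    simp only [List.foldl]
    rw [show stepMin key v x = v by unfold stepMin; exact if_neg (h x (by simp))]
    exact ih v (fun y hy => h y (by simp [hy]))

theorem foldl_firstmin {α κ : Type} [LinearOrder κ] (key : α → κ) (m : α) (l2 : List α)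
    (hm2 : ∀ x ∈ l2, ¬ key x < key m) :
    ∀ (l1 : List α) (a : α), key m < key a → (∀ x ∈ l1, key m < key x) →
      List.foldl (stepMin key) a (l1 ++ m :: l2) = m := by
  intro l1
  induction l1 with
  | nil =>
    intro a ha _
    simp only [List.nil_append, List.foldl]
    rw [show stepMin key a m = m by unfold stepMin; exact if_pos ha]
    exact foldl_stay key l2 m hm2
  | cons v l1' ih =>
    intro a ha h1
    simp only [List.cons_append, List.foldl]
    refine ih (stepMin key a v) ?_ (fun y hy => h1 y (by simp [hy]))
    unfold stepMin; split_ifs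
    · exact h1 v (by simp)
    · exact ha

theorem foldl_congr_key {α κ : Type} [LinearOrder κ] (k1 k2 : α → κ) :
    ∀ (t : List α) (v : α), k1 v = k2 v → (∀ x ∈ t, k1 x = k2 x) →
      t.foldl (stepMin k1) v = t.foldl (stepMin k2) v := by
  intro t
  induction t with
  | nil => intro v _ _; rfl
  | cons x xs ih =>
    intro v hv h
    simp only [List.foldl]
    rw [show stepMin k1 v x = stepMin k2 v x by
      unfold stepMin; rw [h x (by simp), hv]]
    refine ih _ ?_ (fun y hy => h y (by simp [hy]))
    unfold stepMin; split_ifs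
    · exact h x (by simp)
    · exact hv

theorem foldl_mono_key {α κ₁ κ₂ : Type} [LinearOrder κ₁] [LinearOrder κ₂]
    (f : κ₁ → κ₂) (hf : ∀ a b : κ₁, f a < f b ↔ a < b) (k : α → κ₁) :
    ∀ (t : List α) (v : α),
      t.foldl (stepMin (fun x => f (k x))) v = t.foldl (stepMin k) v := by
  intro t
  induction t with
  | nil => intro v; rfl
  | cons x xs ih =>
    intro v
    simp only [List.foldl]
    rw [show stepMin (fun x => f (k x)) v x = stepMin k v x by
      unfold stepMin; simp only [hf]]
    exact ih _

theorem mem_idxs_ge {l : List String} {pr : String → Bool} {t : Int} {x : Int}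
    (hx : x ∈ ((PySem.List.enumerate l t).filter (fun q => pr q.2)).map (·.1)) : t ≤ x := by
  rcases List.mem_map.mp hx with ⟨q, hq, rfl⟩
  rcases (PySem.List.mem_enumerate_iff _ _ _).mp (List.mem_filter.mp hq).1 with ⟨k, hk, rfl⟩
  show t ≤ t + (k : Int)
  omega

theorem min?_idxs (pr : String → Bool) :
    ∀ (order : List String) (s : Int),
      PySem.List.min? (((PySem.List.enumerate order s).filter (fun q => pr q.2)).map (·.1))
          (fun i => i)
        = if order.any pr then some (s + (order.findIdx pr : Int)) else none := by
  intro order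
  induction order with
  | nil => intro s; simp [PySem.List.enumerate_nil, PySem.List.min?]
  | cons p ps ih =>
    intro s
    rw [PySem.List.enumerate_cons]
    by_cases hp : pr p
    · simp only [List.filter_cons, hp, if_pos, List.map_cons]
      rw [min?_cons]
      rw [foldl_stay (fun i : Int => i) _ s
        (fun x hx => by have := mem_idxs_ge hx; simp only; omega)]
      simp [List.any_cons, hp, List.findIdx_cons]
    · simp only [List.filter_cons, hp]
      simp only [Bool.false_eq_true, if_false]
      rw [ih (s + 1)]
      simp only [List.any_cons, hp, Bool.false_or, List.findIdx_cons, cond_false]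
      by_cases ha : ps.any pr <;> simp [ha]
      push_cast
      omega

theorem bRank_eq (order : List String) (m : String) :
    bRank order m = ((kIdx order m : Nat) : Int) := by
  unfold bRank kIdx
  rw [min?_idxs (fun p => PySem.Str.isIn p (PySem.Str.lower m)) order 0]
  by_cases ha : order.any (fun p => PySem.Str.isIn p (PySem.Str.lower m))
  · rw [if_pos ha]
    simp
  · simp only [ha, Bool.false_eq_true, if_false]
    have hall : ∀ x ∈ order, (fun p => PySem.Str.isIn p (PySem.Str.lower m)) x = false := by
      intro x hx
      rcases h : PySem.Str.isIn x (PySem.Str.lower m) with _ | _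
      · simpa using h
      · exact absurd (List.any_eq_true.mpr ⟨x, hx, h⟩) ha
    rw [List.findIdx_eq_length.mpr hall]

theorem main_eq (order : List String) :
    ∀ (v : String) (t : List String),
      (match aFindPriority order (v :: t) with
        | some m => some m
        | none => PySem.List.pyGet? (v :: t) 0)
      = PySem.List.min? (v :: t) (fun m => ((kIdx order m : Nat) : Int)) := by
  induction order with
  | nil =>
    intro v t
    rw [min?_cons]
    rw [foldl_stay _ t v (by intro x hx; simp [kIdx])]
    simp [aFindPriority, PySem.List.pyGet?, PySem.List.pyIdx?]
  | cons p ps ih =>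
    intro v t
    cases h : (v :: t).find? (fun m => PySem.Str.isIn p (PySem.Str.lower m)) with
    | some m =>
      simp only [aFindPriority_cons, h]
      rcases List.find?_eq_some_iff_append.mp h with ⟨hm, l1, l2, heq, hl1⟩
      have hkm : kIdx (p :: ps) m = 0 := by
        simp only [kIdx, List.findIdx_cons, hm, cond_true]
      have hl1' : ∀ x ∈ l1, 0 < kIdx (p :: ps) x := by
        intro x hx
        have hx' : PySem.Str.isIn p (PySem.Str.lower x) = false := by
          rcases hb : PySem.Str.isIn p (PySem.Str.lower x) with _ | _
          · rfl
          · exact absurd hb (by simpa using hl1 x hx)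
        simp only [kIdx, List.findIdx_cons, hx', cond_false]
        omega
      have hm2 : ∀ x ∈ l2, ¬ ((kIdx (p :: ps) x : Nat) : Int) < ((kIdx (p :: ps) m : Nat) : Int) := by
        intro x hx; rw [hkm]; push_cast; omega
      rw [heq]
      cases l1 with
      | nil =>
        try simp only [List.nil_append]
        rw [min?_cons]
        rw [foldl_stay _ l2 m (by
          intro x hx
          try simp only
          exact hm2 x hx)]
      | cons a l1' =>
        try simp only [List.cons_append]
        rw [min?_cons]
        rw [foldl_firstmin (fun m => ((kIdx (p :: ps) m : Nat) : Int)) m l2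
          (fun x hx => by simp only; exact hm2 x hx) l1' a
          (by
            have := hl1' a (by simp)
            try simp only
            rw [hkm]; push_cast; omega)
          (fun x hx => by
            have := hl1' x (by simp [hx])
            try simp only
            rw [hkm]; push_cast; omega)]
    | none =>
      simp only [aFindPriority_cons, h]
      have hall : ∀ x ∈ v :: t, ¬ PySem.Str.isIn p (PySem.Str.lower x) = true :=
        List.find?_eq_none.mp h
      have hshift : ∀ x ∈ v :: t,
          ((kIdx (p :: ps) x : Nat) : Int) = ((kIdx ps x : Nat) : Int) + 1 := by
        intro x hx
        have hx' : PySem.Str.isIn p (PySem.Str.lower x) = false := by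
          rcases hb : PySem.Str.isIn p (PySem.Str.lower x) with _ | _
          · rfl
          · exact absurd hb (hall x hx)
        simp only [kIdx, List.findIdx_cons, hx', cond_false]
        push_cast
        ring
      rw [min?_cons]
      rw [foldl_congr_key (fun m => ((kIdx (p :: ps) m : Nat) : Int))
        (fun m => ((kIdx ps m : Nat) : Int) + 1) t v
        (hshift v (by simp)) (fun x hx => hshift x (by simp [hx]))]
      rw [foldl_mono_key (fun z : Int => z + 1) (by intro a b; simp)
        (fun m => ((kIdx ps m : Nat) : Int)) t v]
      have hih := ih v t
      rw [min?_cons] at hih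
      exact hih

-- ===== VERDICT (by name: the statement is the Claim_ definition above) =====
theorem recommend_vision_model_spec : Claim_equal_recommend_vision_model := by
  intro available_models quality_priority _
  unfold Spec_recommend_vision_model
  unfold recommend_vision_model recommend_vision_model_alt
  rw [vis_eq]
  cases hvm : available_models.filter b_is_vision_capable with
  | nil => simp
  | cons v t =>
    simp only [List.isEmpty_cons, Bool.false_eq_true, if_false]
    rw [show bRank (if quality_priority then ["35b-a3b", "27b", "9b", "4b"]
              else ["4b", "9b", "27b", "35b-a3b"])
        = fun m => ((kIdx (if quality_priority then ["35b-a3b", "27b", "9b", "4b"]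
              else ["4b", "9b", "27b", "35b-a3b"]) m : Nat) : Int) from
      funext (fun m => bRank_eq _ m)]
    exact main_eq _ v t
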